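-- pv_equiv track=rewrite | github.com/AlexCovizzi/critical-node-problem | main.py | first_improvement_2_swap
-- ===== SOURCE A (Python) =====
-- def visit_connected(graph, i, visited):
--     visited[i] = 1
--     row = graph[i]
--     for j in range(len(row)):
--         if row[j] == 1 and visited[j] == 0:
--             visit_connected(graph, j, visited)
--
-- def calc_objective(graph, removed):
--     sol = 0
--     visited = [0 for row in graph]
--
--     # segna i nodi rimossi come visitati, cosi non vengono contati
--     for i in removed:
--         visited[i] = 1
--
--     while sum(visited) != len(visited):
--         index = visited.index(0)
--         visit_connected(graph, index, visited)
--         sol += 1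
--
--     return sol
--
-- def first_improvement_2_swap(graph, removed):
--     left = [node for node in range(len(graph)) if node not in removed]
--     sol = calc_objective(graph, removed)
--     best_swap = None
--     for r1 in removed:
--         for r2 in [r for r in removed if r != r1]:
--             for l1 in left:
--                 for l2 in [l for l in left if l != l1]:
--                     removed_copy = removed[:]
--                     removed_copy[removed_copy.index(r1)] = l1
--                     removed_copy[removed_copy.index(r2)] = l2
--                     sol_swapped = calc_objective(graph, removed_copy)
--                     if sol_swapped > sol:
--                         removed[removed.index(r1)] = l1
--                         removed[removed.index(r2)] = l2
--                         return True
-- ===== SOURCE B (Python) =====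
-- def count_components(graph, removed):
--     n = len(graph)
--     visited = [0] * n
--     for i in removed:
--         visited[i] = 1
--     sol = 0
--     for start in range(n):
--         if visited[start] == 0:
--             sol += 1
--             visited[start] = 1
--             stack = [start]
--             while stack:
--                 i = stack.pop()
--                 row = graph[i]
--                 for j in range(len(row)):
--                     if row[j] == 1 and visited[j] == 0:
--                         visited[j] = 1
--                         stack.append(j)
--     return sol
--
-- def apply_swap(removed, r1, r2, l1, l2):
--     cand = removed[:]
--     cand[cand.index(r1)] = l1
--     cand[cand.index(r2)] = l2
--     return cand
--
-- def first_improvement_2_swap(graph, removed):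
--     n = len(graph)
--     left = [v for v in range(n) if v not in removed]
--     sol = count_components(graph, removed)
--     cands = [(r1, r2, l1, l2)
--              for r1 in removed for r2 in removed if r2 != r1
--              for l1 in left for l2 in left if l2 != l1]
--     for r1, r2, l1, l2 in cands:
--         if count_components(graph, apply_swap(removed, r1, r2, l1, l2)) > sol:
--             removed[removed.index(r1)] = l1
--             removed[removed.index(r2)] = l2
--             return True
--     return None
-- ===== Notes on version B (the rewrite author's own statement) =====
-- stated objective: alternative
-- what changed: The component count's recursive DFS plus repeated sum/index(0) rescans of the visited list is replaced by a single ascending scan over the nodes with an explicit-stack iterative DFS, and the four nested first-improvement loops are flattened into one pass over a precomputed list of candidate swaps.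
-- outside the precondition, e.g. on first_improvement_2_swap([[0], [0, 0, 1]], [1]): A returns None, B returns None
import Mathlib
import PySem

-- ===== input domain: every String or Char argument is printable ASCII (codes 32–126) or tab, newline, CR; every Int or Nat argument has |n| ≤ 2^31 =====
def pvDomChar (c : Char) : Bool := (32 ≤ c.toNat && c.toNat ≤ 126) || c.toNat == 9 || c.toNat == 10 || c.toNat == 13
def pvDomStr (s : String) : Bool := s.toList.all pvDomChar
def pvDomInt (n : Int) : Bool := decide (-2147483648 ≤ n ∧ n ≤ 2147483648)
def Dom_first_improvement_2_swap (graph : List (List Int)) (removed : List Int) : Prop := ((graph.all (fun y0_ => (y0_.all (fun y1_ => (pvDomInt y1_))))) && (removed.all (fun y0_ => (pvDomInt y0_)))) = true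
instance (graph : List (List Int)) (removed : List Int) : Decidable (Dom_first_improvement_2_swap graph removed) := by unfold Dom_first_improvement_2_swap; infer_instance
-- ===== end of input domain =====

-- B replaces A's recursive DFS + repeated sum/index rescans by one ascending scan with an
-- explicit-stack DFS, and flattens the four nested swap loops into one pass over a candidate
-- list (objective: alternative).  A mutates `removed` on success; B performs the same mutation;
-- the equivalence proved here is about the return value only.

-- ===== PORT A =====
-- `for i in removed: visited[i] = 1`  (identical line in both Pythons; negative i wraps,
-- out-of-range i raises IndexError in Python — excluded by Pre_, pySetD then no-ops)
def pvMarkRemoved (visited : List Int) : List Int → List Int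
  | [] => visited
  | i :: rest => pvMarkRemoved (PySem.List.pySetD visited i 1) rest

-- recursive visit_connected; fuel only makes the recursion total (Python terminates because
-- each call marks a fresh 0 entry; fuel `len+1` always suffices, proved below).
-- Reads `visited[j]` with j ≥ len raise IndexError in Python: excluded by Pre_ (getD here).
mutual
def visitA (g : List (List Int)) : Nat → Nat → List Int → List Int
  | 0, _, visited => visited
  | fuel+1, i, visited =>
    visitRowA g fuel i (List.range (g.getD i []).length) (visited.set i 1)
termination_by fuel i visited => (fuel, 0)
def visitRowA (g : List (List Int)) (fuel i : Nat) : List Nat → List Int → List Int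
  | [], visited => visited
  | j :: js, visited =>
    if (g.getD i []).getD j 0 = 1 ∧ visited.getD j 0 = 0 then
      visitRowA g fuel i js (visitA g fuel j visited)
    else visitRowA g fuel i js visited
termination_by js visited => (fuel, js.length + 1)
end

-- the `while sum(visited) != len(visited)` loop of calc_objective (fuel: see comment above;
-- the `none` branch of index? is Python's ValueError, unreachable on a 0/1 visited list)
def calcLoopA (g : List (List Int)) : Nat → List Int → Int → Int
  | 0, _, sol => sol
  | fuel+1, visited, sol =>
    if visited.sum ≠ (visited.length : Int) then
      match PySem.List.index? visited 0 with
      | some idx => calcLoopA g fuel (visitA g (visited.length + 1) idx visited) (sol + 1)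
      | none => sol
    else sol

def calcObjective (g : List (List Int)) (removed : List Int) : Int :=
  let visited := pvMarkRemoved (g.map (fun _ => (0 : Int))) removed
  calcLoopA g (visited.length + 1) visited 0

-- `[node for node in range(len(graph)) if node not in removed]` (same line in both Pythons)
def pvLeft (g : List (List Int)) (removed : List Int) : List Int :=
  ((List.range g.length).map (fun node => (node : Int))).filter (fun node => !(removed.contains node))

-- `xs[xs.index(a)] = b` (a is always present at the call sites; Python would raise ValueError otherwise)
def setFirstA (a b : Int) : List Int → List Int
  | [] => []
  | x :: rest => if x = a then b :: rest else x :: setFirstA a b rest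

def loopL2A (g : List (List Int)) (sol : Int) (removed : List Int) (r1 r2 l1 : Int) : List Int → Option Bool
  | [] => none
  | l2 :: rest =>
    if calcObjective g (setFirstA r2 l2 (setFirstA r1 l1 removed)) > sol then some true
    else loopL2A g sol removed r1 r2 l1 rest

def loopL1A (g : List (List Int)) (sol : Int) (removed left : List Int) (r1 r2 : Int) : List Int → Option Bool
  | [] => none
  | l1 :: rest =>
    match loopL2A g sol removed r1 r2 l1 (left.filter (fun l => l != l1)) with
    | some b => some b
    | none => loopL1A g sol removed left r1 r2 rest

def loopR2A (g : List (List Int)) (sol : Int) (removed left : List Int) (r1 : Int) : List Int → Option Bool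
  | [] => none
  | r2 :: rest =>
    match loopL1A g sol removed left r1 r2 left with
    | some b => some b
    | none => loopR2A g sol removed left r1 rest

def loopR1A (g : List (List Int)) (sol : Int) (removed left : List Int) : List Int → Option Bool
  | [] => none
  | r1 :: rest =>
    match loopR2A g sol removed left r1 (removed.filter (fun r => r != r1)) with
    | some b => some b
    | none => loopR1A g sol removed left rest

def first_improvement_2_swap (graph : List (List Int)) (removed : List Int) : Option Bool :=
  let left := pvLeft graph removed
  let sol := calcObjective graph removed
  loopR1A graph sol removed left removed

-- ===== PORT B =====
-- inner `for j in range(len(row))` of the stack DFS: push unmarked 1-neighbours (stack top = list head)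
def pushRowB (g : List (List Int)) (i : Nat) : List Nat → List Nat × List Int → List Nat × List Int
  | [], p => p
  | j :: js, p =>
    if (g.getD i []).getD j 0 = 1 ∧ p.2.getD j 0 = 0 then
      pushRowB g i js (j :: p.1, p.2.set j 1)
    else pushRowB g i js p

-- `while stack:` — fuel only makes the loop total (pops ≤ pushes ≤ len, proved below)
def stackLoopB (g : List (List Int)) : Nat → List Nat → List Int → List Int
  | 0, _, v => v
  | _+1, [], v => v
  | fuel+1, i :: st, v =>
    let p := pushRowB g i (List.range (g.getD i []).length) (st, v)
    stackLoopB g fuel p.1 p.2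

-- `for start in range(n):` with accumulator (sol, visited)
def scanB (g : List (List Int)) : List Nat → Int × List Int → Int × List Int
  | [], p => p
  | start :: rest, p =>
    if p.2.getD start 0 = 0 then
      scanB g rest (p.1 + 1, stackLoopB g (g.length + 1) [start] (p.2.set start 1))
    else scanB g rest p

def countComponents (g : List (List Int)) (removed : List Int) : Int :=
  let visited := pvMarkRemoved (List.replicate g.length (0 : Int)) removed
  (scanB g (List.range g.length) (0, visited)).1

-- apply_swap of Source B (cand.index never raises: r1, r2 are members)
def applySwapB (removed : List Int) (r1 r2 l1 l2 : Int) : List Int :=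
  let c := match PySem.List.index? removed r1 with
    | some p => removed.set p l1
    | none => removed
  match PySem.List.index? c r2 with
  | some p => c.set p l2
  | none => c

def first_improvement_2_swap_alt (graph : List (List Int)) (removed : List Int) : Option Bool :=
  let left := pvLeft graph removed
  let sol := countComponents graph removed
  let cands := removed.flatMap (fun r1 =>
    (removed.filter (fun r => r != r1)).flatMap (fun r2 =>
      left.flatMap (fun l1 =>
        (left.filter (fun l => l != l1)).map (fun l2 => (r1, r2, l1, l2)))))
  match cands.find? (fun c =>
      decide (countComponents graph (applySwapB removed c.1 c.2.1 c.2.2.1 c.2.2.2) > sol)) with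
  | some _ => some true
  | none => none

-- ===== PRECONDITION & SPEC =====
-- Pre_ excludes the inputs where A raises IndexError: a removed entry outside [-n, n), or a row
-- carrying the value 1 in a column ≥ n (reading visited there raises when the DFS reaches that
-- row; rows like that are excluded conservatively even when unreached — see the cite, where A
-- still returns and B returns the same value).
def Pre_first_improvement_2_swap (graph : List (List Int)) (removed : List Int) : Prop :=
  (∀ x ∈ removed, -(graph.length : Int) ≤ x ∧ x < (graph.length : Int)) ∧
  (∀ row ∈ graph, ∀ j, j < row.length → graph.length ≤ j → row.getD j 0 ≠ 1)

instance (graph : List (List Int)) (removed : List Int) : Decidable (Pre_first_improvement_2_swap graph removed) := by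
  unfold Pre_first_improvement_2_swap; infer_instance

def pvWitness_first_improvement_2_swap : List (List Int) × List Int :=
  ([[0, 1, 0], [1, 0, 0], [0, 0, 0]], [0])

def Spec_first_improvement_2_swap (graph : List (List Int)) (removed : List Int) (out : Option Bool) : Prop :=
  out = first_improvement_2_swap_alt graph removed

instance (graph : List (List Int)) (removed : List Int) (out : Option Bool) : Decidable (Spec_first_improvement_2_swap graph removed out) := by
  unfold Spec_first_improvement_2_swap; infer_instance

-- ===== CLAIM (what is proved, stated in full; the proofs are below) =====
def Claim_equal_first_improvement_2_swap : Prop := ∀ (graph : List (List Int)) (removed : List Int), Dom_first_improvement_2_swap graph removed → Pre_first_improvement_2_swap graph removed → Spec_first_improvement_2_swap graph removed (first_improvement_2_swap graph removed)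

-- ===== LEMMAS AND PROOFS =====

-- visited lists are 0/1 valued
def pvGV (v : List Int) : Prop := ∀ k : Nat, v.getD k 0 = 0 ∨ v.getD k 0 = 1

-- number of unvisited entries
def pvZeros (v : List Int) : Nat := v.countP (fun x => x == 0)

-- graph is "in range": a 1 entry only occurs in a column < len(graph)
def pvH1 (g : List (List Int)) : Prop := ∀ i j : Nat, (g.getD i []).getD j 0 = 1 → j < g.length

-- reachability from i following 1-edges whose target is unvisited in v
inductive pvReach (g : List (List Int)) (v : List Int) : Nat → Nat → Prop
  | refl (i : Nat) : pvReach g v i i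
  | step {i j k : Nat} : pvReach g v i j → (g.getD j []).getD k 0 = 1 → v.getD k 0 = 0 →
      pvReach g v i k

theorem pvGetD_set (v : List Int) (k : Nat) (c : Int) (m : Nat) :
    (v.set k c).getD m 0 = if m = k ∧ k < v.length then c else v.getD m 0 := by
  simp only [List.getD_eq_getElem?_getD, List.getElem?_set]
  rcases eq_or_ne m k with h1 | h1
  · subst h1
    by_cases h2 : m < v.length <;> simp [h2]
  · simp [h1, Ne.symm h1]

theorem pvZeros_le (w v : List Int) (hlen : w.length = v.length)
    (h : ∀ k, w.getD k 0 = v.getD k 0 ∨ w.getD k 0 = 1) : pvZeros w ≤ pvZeros v := by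
  induction w generalizing v with
  | nil => simp [pvZeros]
  | cons a w' ih =>
    cases v with
    | nil => simp at hlen
    | cons b v' =>
      have h0 := h 0
      simp only [List.getD_cons_zero] at h0
      have ht : ∀ k, w'.getD k 0 = v'.getD k 0 ∨ w'.getD k 0 = 1 := fun k => by
        simpa [List.getD_cons_succ] using h (k + 1)
      have hrec := ih (v := v') (by simpa using hlen) ht
      simp only [pvZeros, List.countP_cons] at *
      by_cases ha : a = 0 <;> by_cases hb : b = 0 <;> simp [ha, hb] at h0 ⊢ <;> omega

theorem pvZeros_lt (w v : List Int) (idx : Nat) (hlen : w.length = v.length)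
    (h : ∀ k, w.getD k 0 = v.getD k 0 ∨ w.getD k 0 = 1)
    (hw : w.getD idx 0 ≠ 0) (hv : v.getD idx 0 = 0) (hidx : idx < v.length) :
    pvZeros w < pvZeros v := by
  induction w generalizing v idx with
  | nil => simp at hlen; omega
  | cons a w' ih =>
    cases v with
    | nil => simp at hlen
    | cons b v' =>
      have h0 := h 0
      simp only [List.getD_cons_zero] at h0
      have ht : ∀ k, w'.getD k 0 = v'.getD k 0 ∨ w'.getD k 0 = 1 := fun k => by
        simpa [List.getD_cons_succ] using h (k + 1)
      have hlen' : w'.length = v'.length := by simpa using hlen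
      cases idx with
      | zero =>
        simp only [List.getD_cons_zero] at hw hv
        have hle := pvZeros_le w' v' hlen' ht
        simp only [pvZeros, List.countP_cons] at *
        by_cases ha : a = 0
        · exact absurd ha hw
        · simp [ha, hv]; omega
      | succ m =>
        simp only [List.getD_cons_succ] at hw hv
        have := ih v' m hlen' ht hw hv (by simpa using hidx)
        simp only [pvZeros, List.countP_cons] at *
        by_cases ha : a = 0 <;> by_cases hb : b = 0 <;> simp [ha, hb] at h0 ⊢ <;> omega

theorem pvZeros_set (v : List Int) (j : Nat) (hj : j < v.length) (hv : v.getD j 0 = 0) :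
    pvZeros (v.set j 1) + 1 = pvZeros v := by
  induction v generalizing j with
  | nil => simp at hj
  | cons b v' ih =>
    cases j with
    | zero =>
      simp only [List.getD_cons_zero] at hv
      simp [pvZeros, List.countP_cons, hv]
    | succ m =>
      simp only [List.getD_cons_succ] at hv
      have := ih m (by simpa using hj) hv
      simp only [List.set_cons_succ, pvZeros, List.countP_cons] at *
      omega

theorem pvSum_eq (v : List Int) (hGV : pvGV v) :
    v.sum + (pvZeros v : Int) = (v.length : Int) := by
  induction v with
  | nil => simp [pvZeros]
  | cons b v' ih =>
    have h0 := hGV 0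
    simp only [List.getD_cons_zero] at h0
    have ht : pvGV v' := fun k => by simpa [List.getD_cons_succ] using hGV (k + 1)
    have := ih ht
    simp only [List.sum_cons, pvZeros, List.countP_cons, List.length_cons] at *
    rcases h0 with h0 | h0 <;> simp [h0] <;> push_cast <;> omega

theorem pvReach_mono {g : List (List Int)} {v v' : List Int} {i k : Nat}
    (h : ∀ m, v'.getD m 0 = 0 → v.getD m 0 = 0) (hr : pvReach g v' i k) : pvReach g v i k := by
  induction hr with
  | refl => exact pvReach.refl i
  | step _ hval hzero ih => exact pvReach.step ih hval (h _ hzero)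

theorem pvReach_trans {g : List (List Int)} {v : List Int} {i j k : Nat}
    (h1 : pvReach g v i j) (h2 : pvReach g v j k) : pvReach g v i k := by
  induction h2 with
  | refl => exact h1
  | step _ hval hzero ih => exact pvReach.step ih hval hzero

theorem pvReach_target {g : List (List Int)} {v : List Int} {i k : Nat}
    (h : pvReach g v i k) : k = i ∨ v.getD k 0 = 0 := by
  cases h with
  | refl => exact Or.inl rfl
  | step _ _ hzero => exact Or.inr hzero

theorem pvReach_set_start {g : List (List Int)} {v : List Int} {i k : Nat}
    (h : pvReach g v i k) : k = i ∨ pvReach g (v.set i 1) i k := by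
  induction h with
  | refl => exact Or.inl rfl
  | @step j k hj hval hzero ih =>
    by_cases hk : k = i
    · exact Or.inl hk
    · refine Or.inr ?_
      have hset : (v.set i 1).getD k 0 = 0 := by
        rw [pvGetD_set, if_neg (by simp [hk])]
        exact hzero
      rcases ih with h' | h'
      · exact pvReach.step (pvReach.refl i) (h' ▸ hval) hset
      · exact pvReach.step h' hval hset

theorem pvReach_marked {g : List (List Int)} {v w : List Int} {i : Nat}
    (hwi : w.getD i 0 = 1)
    (hcl : ∀ m, w.getD m 0 = 1 → (v.getD m 0 = 0 ∨ m = i) →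
        ∀ k, (g.getD m []).getD k 0 = 1 → w.getD k 0 = 1) :
    ∀ k, pvReach g v i k → w.getD k 0 = 1 := by
  intro k hr
  induction hr with
  | refl => exact hwi
  | @step m k hm hval hzero ih =>
    have hcond : v.getD m 0 = 0 ∨ m = i := by
      rcases pvReach_target hm with h | h
      · exact Or.inr h
      · exact Or.inl h
    exact hcl m ih hcond k hval

-- invariant for the inner row fold of visitA (relative to the call's v and i)
def pvInvA (g : List (List Int)) (v : List Int) (i : Nat) (u : List Int) : Prop :=
  u.length = v.length ∧
  (∀ k, u.getD k 0 = v.getD k 0 ∨ u.getD k 0 = 1) ∧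
  (∀ k, u.getD k 0 = 1 → v.getD k 0 = 1 ∨ pvReach g v i k) ∧
  (∀ m, u.getD m 0 = 1 → v.getD m 0 = 0 → m ≠ i →
    ∀ k, (g.getD m []).getD k 0 = 1 → u.getD k 0 = 1) ∧
  pvZeros u ≤ pvZeros (v.set i 1) ∧
  u.getD i 0 = 1

theorem visitA_spec (g : List (List Int)) (hH1 : pvH1 g) :
    ∀ (fuel : Nat) (v : List Int) (i : Nat),
    v.length = g.length → pvGV v → i < g.length → v.getD i 0 = 0 → pvZeros v < fuel →
    (visitA g fuel i v).length = v.length ∧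
    (∀ k, (visitA g fuel i v).getD k 0 = v.getD k 0 ∨
          ((visitA g fuel i v).getD k 0 = 1 ∧ pvReach g v i k)) ∧
    (visitA g fuel i v).getD i 0 = 1 ∧
    (∀ m, (visitA g fuel i v).getD m 0 = 1 → v.getD m 0 = 0 →
      ∀ k, (g.getD m []).getD k 0 = 1 → (visitA g fuel i v).getD k 0 = 1) := by
  intro fuel
  induction fuel with
  | zero => intro v i _ _ _ _ h; omega
  | succ f ih =>
    intro v i hlen hGV hi hvi hfuel
    have hiv : i < v.length := by omega
    have hz1 : pvZeros (v.set i 1) + 1 = pvZeros v := pvZeros_set v i hiv hvi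
    have hzv1 : pvZeros (v.set i 1) < f := by omega
    have inner : ∀ (js : List Nat) (u : List Int), pvInvA g v i u →
        pvInvA g v i (visitRowA g f i js u) ∧
        (∀ k, u.getD k 0 = 1 → (visitRowA g f i js u).getD k 0 = 1) ∧
        (∀ j ∈ js, (g.getD i []).getD j 0 = 1 → (visitRowA g f i js u).getD j 0 = 1) := by
      intro js
      induction js with
      | nil =>
        intro u hu
        have h0 : visitRowA g f i [] u = u := by rw [visitRowA]
        rw [h0]; exact ⟨hu, fun k h => h, by simp⟩
      | cons j js' ihj =>
        intro u hu
        obtain ⟨hu1, hu2, hu3, hu4, hu5, hu6⟩ := hu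
        by_cases hc : (g.getD i []).getD j 0 = 1 ∧ u.getD j 0 = 0
        · obtain ⟨hval, huj⟩ := hc
          have hmono0 : ∀ m, u.getD m 0 = 0 → v.getD m 0 = 0 := by
            intro m h0
            rcases hu2 m with h | h
            · rw [← h]; exact h0
            · rw [h0] at h; exact absurd h (by norm_num)
          have hGVu : pvGV u := by
            intro k
            rcases hu2 k with h | h
            · rw [h]; exact hGV k
            · exact Or.inr h
          have hjlt : j < g.length := hH1 i j hval
          have hrec := ih u j (hu1.trans hlen) hGVu hjlt huj (by omega)
          obtain ⟨hL, hPW, hMJ, hCL⟩ := hrec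
          set u' := visitA g f j u with hu'def
          have hmonoU : ∀ k, u.getD k 0 = 1 → u'.getD k 0 = 1 := by
            intro k h1
            rcases hPW k with h | h
            · rw [h]; exact h1
            · exact h.1
          have hvj : v.getD j 0 = 0 := hmono0 j huj
          have hreachij : pvReach g v i j := pvReach.step (pvReach.refl i) hval hvj
          have hu' : pvInvA g v i u' := by
            refine ⟨hL.trans hu1, ?_, ?_, ?_, ?_, hmonoU i hu6⟩
            · intro k
              rcases hPW k with h | h
              · rw [h]; exact hu2 k
              · exact Or.inr h.1
            · intro k hk1
              rcases hPW k with h | h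
              · exact hu3 k (h ▸ hk1)
              · refine Or.inr (pvReach_trans hreachij (pvReach_mono hmono0 h.2))
            · intro m hm1 hmv hmi k hk
              by_cases hum : u.getD m 0 = 0
              · exact hCL m hm1 hum k hk
              · have hum1 : u.getD m 0 = 1 := by rcases hGVu m with h | h; exact absurd h hum; exact h
                exact hmonoU k (hu4 m hum1 hmv hmi k hk)
            · exact le_trans (pvZeros_le u' u hL (fun k => by
                rcases hPW k with h | h
                · exact Or.inl h
                · exact Or.inr h.1)) hu5
          have hrest := ihj u' hu'
          refine ⟨?_, ?_, ?_⟩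
          · have : visitRowA g f i (j :: js') u = visitRowA g f i js' u' := by
              rw [visitRowA, if_pos ⟨hval, huj⟩]
            rw [this]; exact hrest.1
          · intro k h1
            have : visitRowA g f i (j :: js') u = visitRowA g f i js' u' := by
              rw [visitRowA, if_pos ⟨hval, huj⟩]
            rw [this]; exact hrest.2.1 k (hmonoU k h1)
          · intro j' hj' hvalj'
            have heq : visitRowA g f i (j :: js') u = visitRowA g f i js' u' := by
              rw [visitRowA, if_pos ⟨hval, huj⟩]
            rw [heq]
            rcases List.mem_cons.mp hj' with h | h
            · subst h; exact hrest.2.1 j' hMJ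
            · exact hrest.2.2 j' h hvalj'
        · have heq : visitRowA g f i (j :: js') u = visitRowA g f i js' u := by
            rw [visitRowA, if_neg hc]
          have hrest := ihj u ⟨hu1, hu2, hu3, hu4, hu5, hu6⟩
          refine ⟨heq ▸ hrest.1, fun k h1 => heq ▸ hrest.2.1 k h1, ?_⟩
          intro j' hj' hvalj'
          rw [heq]
          rcases List.mem_cons.mp hj' with h | h
          · subst h
            have huj1 : u.getD j' 0 = 1 := by
              rcases hu2 j' with h2 | h2
              · by_contra hne
                exact hc ⟨hvalj', by
                  rcases hGV j' with h3 | h3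
                  · rw [h2, h3]
                  · rw [h2] at hne ⊢; exact absurd (h2 ▸ h3) (h2 ▸ hne)⟩
              · exact h2
            exact hrest.2.1 j' huj1
          · exact hrest.2.2 j' h hvalj'
    have hbase : pvInvA g v i (v.set i 1) := by
      refine ⟨List.length_set .., ?_, ?_, ?_, le_refl _, ?_⟩
      · intro k
        rw [pvGetD_set]
        by_cases hk : k = i ∧ i < v.length
        · rw [if_pos hk]; exact Or.inr rfl
        · rw [if_neg hk]; exact Or.inl rfl
      · intro k hk
        rw [pvGetD_set] at hk
        by_cases hki : k = i ∧ i < v.length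
        · exact Or.inr (by rw [hki.1]; exact pvReach.refl i)
        · rw [if_neg hki] at hk; exact Or.inl hk
      · intro m hm1 hmv hmi k hk
        rw [pvGetD_set, if_neg (fun hc => hmi hc.1)] at hm1
        rw [hmv] at hm1; exact absurd hm1 (by norm_num)
      · rw [pvGetD_set, if_pos ⟨rfl, hiv⟩]
    have hres := inner (List.range (g.getD i []).length) (v.set i 1) hbase
    obtain ⟨⟨hI1, hI2, hI3, hI4, hI5, hI6⟩, hMONO, hSUF⟩ := hres
    have hw : visitA g (f+1) i v = visitRowA g f i (List.range (g.getD i []).length) (v.set i 1) := by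
      rw [visitA]
    rw [hw]
    set w := visitRowA g f i (List.range (g.getD i []).length) (v.set i 1) with hwdef
    refine ⟨hI1, ?_, hI6, ?_⟩
    · intro k
      rcases hI2 k with h | h
      · exact Or.inl h
      · rcases hI3 k h with h2 | h2
        · exact Or.inl (h.trans h2.symm)
        · exact Or.inr ⟨h, h2⟩
    · intro m hm1 hmv k hk
      by_cases hmi : m = i
      · subst hmi
        have hklt : k < (g.getD m []).length := by
          by_contra hge
          rw [List.getD_eq_default _ _ (by omega)] at hk
          exact absurd hk (by norm_num)
        exact hSUF k (List.mem_range.mpr hklt) hk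
      · exact hI4 m hm1 hmv hmi k hk

-- invariant for the inner row fold of the stack loop (relative to the popped i, rest st, and v)
def pvInvB (g : List (List Int)) (v : List Int) (i : Nat) (st : List Nat) (p : List Nat × List Int) : Prop :=
  p.2.length = v.length ∧
  (∀ k, p.2.getD k 0 = v.getD k 0 ∨ (p.2.getD k 0 = 1 ∧ k ∈ p.1)) ∧
  (∀ s ∈ p.1, p.2.getD s 0 = 1 ∧ s < g.length) ∧
  (∃ new, p.1 = new ++ st ∧ ∀ s ∈ new, (g.getD i []).getD s 0 = 1 ∧ v.getD s 0 = 0) ∧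
  pvZeros p.2 + p.1.length = pvZeros v + st.length

theorem pushRowB_inv (g : List (List Int)) (hH1 : pvH1 g) (v : List Int) (i : Nat) (st : List Nat)
    (hlen : v.length = g.length) (hGV : pvGV v) :
    ∀ (js : List Nat) (p : List Nat × List Int), pvInvB g v i st p →
    pvInvB g v i st (pushRowB g i js p) ∧
    (∀ k, p.2.getD k 0 = 1 → (pushRowB g i js p).2.getD k 0 = 1) ∧
    (∀ j ∈ js, (g.getD i []).getD j 0 = 1 → (pushRowB g i js p).2.getD j 0 = 1) := by
  intro js
  induction js with
  | nil =>
    intro p hp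
    have h0 : pushRowB g i [] p = p := by rw [pushRowB]
    rw [h0]; exact ⟨hp, fun k h => h, by simp⟩
  | cons j js' ihj =>
    intro p hp
    obtain ⟨hp1, hp2, hp3, ⟨new, hnew, hnewP⟩, hp5⟩ := hp
    have hGVu : pvGV p.2 := by
      intro k
      rcases hp2 k with h | h
      · rw [h]; exact hGV k
      · exact Or.inr h.1
    by_cases hc : (g.getD i []).getD j 0 = 1 ∧ p.2.getD j 0 = 0
    · obtain ⟨hval, huj⟩ := hc
      have hjg : j < g.length := hH1 i j hval
      have hju : j < p.2.length := by omega
      have hvj : v.getD j 0 = 0 := by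
        rcases hp2 j with h | h
        · rw [← h]; exact huj
        · rw [huj] at h; exact absurd h.1 (by norm_num)
      have heq : pushRowB g i (j :: js') p = pushRowB g i js' (j :: p.1, p.2.set j 1) := by
        rw [pushRowB, if_pos ⟨hval, huj⟩]
      have hp' : pvInvB g v i st (j :: p.1, p.2.set j 1) := by
        refine ⟨(List.length_set ..).trans hp1, ?_, ?_, ?_, ?_⟩
        · intro k
          rw [pvGetD_set]
          by_cases hk : k = j ∧ j < p.2.length
          · rw [if_pos hk]
            exact Or.inr ⟨rfl, by simp [hk.1]⟩
          · rw [if_neg hk]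
            rcases hp2 k with h | h
            · exact Or.inl h
            · exact Or.inr ⟨h.1, List.mem_cons_of_mem _ h.2⟩
        · intro s hs
          rcases List.mem_cons.mp hs with h | h
          · subst h
            exact ⟨by rw [pvGetD_set, if_pos ⟨rfl, hju⟩], hjg⟩
          · refine ⟨?_, (hp3 s h).2⟩
            rw [pvGetD_set]
            by_cases hk : s = j ∧ j < p.2.length
            · rw [if_pos hk]
            · rw [if_neg hk]; exact (hp3 s h).1
        · exact ⟨j :: new, by simp [hnew], by
            intro s hs
            rcases List.mem_cons.mp hs with h | h
            · subst h; exact ⟨hval, hvj⟩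
            · exact hnewP s h⟩
        · have := pvZeros_set p.2 j hju huj
          simp only [List.length_cons]
          omega
      have hrest := ihj (j :: p.1, p.2.set j 1) hp'
      rw [heq]
      have hmono1 : ∀ k, p.2.getD k 0 = 1 → (p.2.set j 1).getD k 0 = 1 := by
        intro k h1
        rw [pvGetD_set]
        by_cases hk : k = j ∧ j < p.2.length
        · rw [if_pos hk]
        · rw [if_neg hk]; exact h1
      refine ⟨hrest.1, fun k h1 => hrest.2.1 k (hmono1 k h1), ?_⟩
      intro j' hj' hvalj'
      rcases List.mem_cons.mp hj' with h | h
      · subst h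
        exact hrest.2.1 j' (by rw [pvGetD_set, if_pos ⟨rfl, hju⟩])
      · exact hrest.2.2 j' h hvalj'
    · have heq : pushRowB g i (j :: js') p = pushRowB g i js' p := by
        rw [pushRowB, if_neg hc]
      have hrest := ihj p ⟨hp1, hp2, hp3, ⟨new, hnew, hnewP⟩, hp5⟩
      rw [heq]
      refine ⟨hrest.1, hrest.2.1, ?_⟩
      intro j' hj' hvalj'
      rcases List.mem_cons.mp hj' with h | h
      · subst h
        have hj1 : p.2.getD j' 0 = 1 := by
          rcases hGVu j' with h2 | h2
          · exact absurd ⟨hvalj', h2⟩ hc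
          · exact h2
        exact hrest.2.1 j' hj1
      · exact hrest.2.2 j' h hvalj'

theorem stackLoopB_spec (g : List (List Int)) (hH1 : pvH1 g) :
    ∀ (fuel : Nat) (S : List Nat) (v : List Int),
    v.length = g.length → pvGV v → (∀ s ∈ S, v.getD s 0 = 1 ∧ s < g.length) →
    pvZeros v + S.length ≤ fuel →
    (stackLoopB g fuel S v).length = v.length ∧
    (∀ k, (stackLoopB g fuel S v).getD k 0 = v.getD k 0 ∨
          ((stackLoopB g fuel S v).getD k 0 = 1 ∧ ∃ s ∈ S, pvReach g v s k)) ∧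
    (∀ m, (stackLoopB g fuel S v).getD m 0 = 1 → (v.getD m 0 = 0 ∨ m ∈ S) →
      ∀ k, (g.getD m []).getD k 0 = 1 → (stackLoopB g fuel S v).getD k 0 = 1) := by
  intro fuel
  induction fuel with
  | zero =>
    intro S v hlen hGV hS hfuel
    have hSnil : S = [] := List.eq_nil_of_length_eq_zero (by omega)
    subst hSnil
    have h0 : stackLoopB g 0 [] v = v := by rw [stackLoopB]
    rw [h0]
    exact ⟨rfl, fun k => Or.inl rfl, fun m hm1 hc k hk => by
      rcases hc with hc | hc
      · rw [hc] at hm1; exact absurd hm1 (by norm_num)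
      · simp at hc⟩
  | succ f ih =>
    intro S v hlen hGV hS hfuel
    cases S with
    | nil =>
      have h0 : stackLoopB g (f+1) [] v = v := by rw [stackLoopB]
      rw [h0]
      exact ⟨rfl, fun k => Or.inl rfl, fun m hm1 hc k hk => by
        rcases hc with hc | hc
        · rw [hc] at hm1; exact absurd hm1 (by norm_num)
        · simp at hc⟩
    | cons i st =>
      have hbase : pvInvB g v i st (st, v) :=
        ⟨rfl, fun k => Or.inl rfl, fun s hs => hS s (List.mem_cons_of_mem _ hs),
          ⟨[], rfl, by simp⟩, rfl⟩
      obtain ⟨⟨hJ1, hJ2, hJ3, ⟨new, hnew, hnewP⟩, hJ5⟩, hMONO, hSUF⟩ :=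
        pushRowB_inv g hH1 v i st hlen hGV (List.range (g.getD i []).length) (st, v) hbase
      have hGVq : pvGV (pushRowB g i (List.range (g.getD i []).length) (st, v)).2 := by
        intro k
        rcases hJ2 k with h | h
        · rw [h]; exact hGV k
        · exact Or.inr h.1
      have hq0 : ∀ m, (pushRowB g i (List.range (g.getD i []).length) (st, v)).2.getD m 0 = 0 →
          v.getD m 0 = 0 := by
        intro m h0
        rcases hJ2 m with h | h
        · rw [← h]; exact h0
        · rw [h0] at h; exact absurd h.1 (by norm_num)
      have hrec := ih (pushRowB g i (List.range (g.getD i []).length) (st, v)).1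
        (pushRowB g i (List.range (g.getD i []).length) (st, v)).2
        (hJ1.trans hlen) hGVq hJ3 (by
          simp only [List.length_cons] at hfuel
          omega)
      obtain ⟨hB1, hB2, hB3⟩ := hrec
      have hstep : stackLoopB g (f+1) (i :: st) v =
          stackLoopB g f (pushRowB g i (List.range (g.getD i []).length) (st, v)).1
            (pushRowB g i (List.range (g.getD i []).length) (st, v)).2 := by
        rw [stackLoopB]
      rw [hstep]
      have hBmono : ∀ k,
          (pushRowB g i (List.range (g.getD i []).length) (st, v)).2.getD k 0 = 1 →
          (stackLoopB g f (pushRowB g i (List.range (g.getD i []).length) (st, v)).1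
            (pushRowB g i (List.range (g.getD i []).length) (st, v)).2).getD k 0 = 1 := by
        intro k h1
        rcases hB2 k with h | h
        · rw [h]; exact h1
        · exact h.1
      refine ⟨hB1.trans hJ1, ?_, ?_⟩
      · intro k
        rcases hB2 k with h | h
        · rw [h]
          rcases hJ2 k with h2 | h2
          · exact Or.inl h2
          · refine Or.inr ⟨h2.1, ?_⟩
            rw [hnew] at h2
            rcases List.mem_append.mp h2.2 with hm | hm
            · exact ⟨i, List.mem_cons_self .., pvReach.step (pvReach.refl i)
                (hnewP k hm).1 (hnewP k hm).2⟩
            · exact ⟨k, List.mem_cons_of_mem _ hm, pvReach.refl k⟩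
        · obtain ⟨h1, s, hsmem, hreach⟩ := h
          have hreachv := pvReach_mono hq0 hreach
          rw [hnew] at hsmem
          rcases List.mem_append.mp hsmem with hm | hm
          · refine Or.inr ⟨h1, i, List.mem_cons_self .., ?_⟩
            exact pvReach_trans (pvReach.step (pvReach.refl i) (hnewP s hm).1 (hnewP s hm).2)
              hreachv
          · exact Or.inr ⟨h1, s, List.mem_cons_of_mem _ hm, hreachv⟩
      · intro m hm1 hcond k hk
        by_cases hmi : m = i
        · subst hmi
          have hklt : k < (g.getD m []).length := by
            by_contra hge
            rw [List.getD_eq_default _ _ (by omega)] at hk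
            exact absurd hk (by norm_num)
          exact hBmono k (hSUF k (List.mem_range.mpr hklt) hk)
        · refine hB3 m hm1 ?_ k hk
          by_cases hq : (pushRowB g i (List.range (g.getD i []).length) (st, v)).2.getD m 0 = 0
          · exact Or.inl hq
          · refine Or.inr ?_
            have hm1' : (pushRowB g i (List.range (g.getD i []).length) (st, v)).2.getD m 0 = 1 := by
              rcases hGVq m with h | h
              · exact absurd h hq
              · exact h
            rcases hJ2 m with h | h
            · rcases hcond with hc | hc
              · rw [h, hc] at hm1'; exact absurd hm1' (by norm_num)
              · rcases List.mem_cons.mp hc with h2 | h2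
                · exact absurd h2 hmi
                · rw [hnew]; exact List.mem_append.mpr (Or.inr h2)
            · exact h.2

theorem close_eq (g : List (List Int)) (hH1 : pvH1 g) (v : List Int) (i : Nat)
    (hlen : v.length = g.length) (hGV : pvGV v) (hi : i < g.length) (hvi : v.getD i 0 = 0) :
    visitA g (v.length + 1) i v = stackLoopB g (g.length + 1) [i] (v.set i 1) := by
  have hiv : i < v.length := by omega
  have hv1len : (v.set i 1).length = v.length := List.length_set ..
  have hGV1 : pvGV (v.set i 1) := by
    intro k
    rw [pvGetD_set]
    by_cases hk : k = i ∧ i < v.length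
    · rw [if_pos hk]; exact Or.inr rfl
    · rw [if_neg hk]; exact hGV k
  have hzv : pvZeros v ≤ v.length := List.countP_le_length
  have hz1 : pvZeros (v.set i 1) + 1 = pvZeros v := pvZeros_set v i hiv hvi
  obtain ⟨hA1, hA2, hA3, hA4⟩ :=
    visitA_spec g hH1 (v.length + 1) v i hlen hGV hi hvi (by omega)
  obtain ⟨hB1, hB2, hB3⟩ :=
    stackLoopB_spec g hH1 (g.length + 1) [i] (v.set i 1) (hv1len.trans hlen) hGV1
      (by
        intro s hs
        rcases List.mem_singleton.mp hs with rfl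
        exact ⟨by rw [pvGetD_set, if_pos ⟨rfl, hiv⟩], hi⟩)
      (by simp only [List.length_singleton]; omega)
  have hq0 : ∀ m, (v.set i 1).getD m 0 = 0 → v.getD m 0 = 0 := by
    intro m h
    rw [pvGetD_set] at h
    by_cases hk : m = i ∧ i < v.length
    · rw [if_pos hk] at h; exact absurd h (by norm_num)
    · rw [if_neg hk] at h; exact h
  have hAc : ∀ k, pvReach g v i k → (visitA g (v.length + 1) i v).getD k 0 = 1 := by
    refine pvReach_marked hA3 ?_
    intro m hm hcond k hk
    refine hA4 m hm ?_ k hk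
    rcases hcond with h | h
    · exact h
    · rw [h]; exact hvi
  have hB_i : (stackLoopB g (g.length + 1) [i] (v.set i 1)).getD i 0 = 1 := by
    rcases hB2 i with h | h
    · rw [h, pvGetD_set, if_pos ⟨rfl, hiv⟩]
    · exact h.1
  have hBc : ∀ k, pvReach g (v.set i 1) i k →
      (stackLoopB g (g.length + 1) [i] (v.set i 1)).getD k 0 = 1 := by
    refine pvReach_marked hB_i ?_
    intro m hm hcond k hk
    refine hB3 m hm ?_ k hk
    rcases hcond with h | h
    · exact Or.inl h
    · exact Or.inr (by simp [h])
  have hg : ∀ (l : List Int) (k : Nat) (h : k < l.length), l[k] = l.getD k 0 := by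
    intro l k h
    simp [List.getD_eq_getElem?_getD, List.getElem?_eq_getElem h]
  refine List.ext_getElem (by rw [hA1, hB1, hv1len]) ?_
  intro k h1 h2
  rw [hg _ k h1, hg _ k h2]
  by_cases hr : pvReach g v i k
  · rw [hAc k hr]
    rcases pvReach_set_start hr with hk | hk
    · rw [hk, hB_i]
    · rw [hBc k hk]
  · have hwa : (visitA g (v.length + 1) i v).getD k 0 = v.getD k 0 := by
      rcases hA2 k with h | h
      · exact h
      · exact absurd h.2 hr
    have hwb : (stackLoopB g (g.length + 1) [i] (v.set i 1)).getD k 0 = (v.set i 1).getD k 0 := by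
      rcases hB2 k with h | h
      · exact h
      · obtain ⟨h1', s, hs, hre⟩ := h
        rcases List.mem_singleton.mp hs with rfl
        exact absurd (pvReach_mono hq0 hre) hr
    have hki : k ≠ i := fun he => hr (by rw [he]; exact pvReach.refl i)
    rw [hwa, hwb, pvGetD_set, if_neg (fun hc => hki hc.1)]

theorem pvSetD_cases (xs : List Int) (i c : Int) :
    ∃ k : Nat, PySem.List.pySetD xs i c = xs.set k c := by
  unfold PySem.List.pySetD PySem.List.pySet?
  cases h : PySem.List.pyIdx? xs.length i with
  | none => exact ⟨xs.length, by simp [h, List.set_eq_of_length_le (le_refl _)]⟩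
  | some k => exact ⟨k, by simp [h]⟩

theorem pvMark_len (rem : List Int) : ∀ v : List Int, (pvMarkRemoved v rem).length = v.length := by
  induction rem with
  | nil => intro v; rw [pvMarkRemoved]
  | cons i rest ih =>
    intro v
    rw [pvMarkRemoved]
    rw [ih]
    exact PySem.List.length_pySetD v i 1

theorem pvMark_GV (rem : List Int) : ∀ v : List Int, pvGV v → pvGV (pvMarkRemoved v rem) := by
  induction rem with
  | nil => intro v hv; rw [pvMarkRemoved]; exact hv
  | cons i rest ih =>
    intro v hv
    rw [pvMarkRemoved]
    refine ih _ ?_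
    obtain ⟨k, hk⟩ := pvSetD_cases v i 1
    rw [hk]
    intro m
    rw [pvGetD_set]
    by_cases hm : m = k ∧ k < v.length
    · rw [if_pos hm]; exact Or.inr rfl
    · rw [if_neg hm]; exact hv m

theorem scanB_skip (g : List (List Int)) :
    ∀ (l : List Nat) (p : Int × List Int), (∀ m ∈ l, p.2.getD m 0 ≠ 0) → scanB g l p = p := by
  intro l
  induction l with
  | nil => intro p _; rw [scanB]
  | cons a rest ih =>
    intro p hp
    rw [scanB, if_neg (hp a (List.mem_cons_self ..))]
    exact ih p (fun m hm => hp m (List.mem_cons_of_mem _ hm))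

theorem scanB_append (g : List (List Int)) :
    ∀ (l1 l2 : List Nat) (p : Int × List Int), scanB g (l1 ++ l2) p = scanB g l2 (scanB g l1 p) := by
  intro l1
  induction l1 with
  | nil => intro l2 p; rw [List.nil_append, scanB]
  | cons a rest ih =>
    intro l2 p
    rw [List.cons_append, scanB, scanB]
    by_cases hc : p.2.getD a 0 = 0
    · rw [if_pos hc, if_pos hc, ih]
    · rw [if_neg hc, if_neg hc, ih]

theorem seeds_eq (g : List (List Int)) (hH1 : pvH1 g) :
    ∀ (z : Nat) (v : List Int) (k : Nat) (sol : Int) (fuel : Nat),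
    pvZeros v = z → v.length = g.length → pvGV v → (∀ m, m < k → v.getD m 0 ≠ 0) →
    pvZeros v < fuel →
    calcLoopA g fuel v sol = (scanB g (List.range' k (g.length - k)) (sol, v)).1 := by
  intro z
  induction z using Nat.strong_induction_on with
  | _ z ihz =>
    intro v k sol fuel hz hlen hGV hpre hfuel
    cases fuel with
    | zero => omega
    | succ f =>
      by_cases hz0 : pvZeros v = 0
      · have hsum0 := pvSum_eq v hGV
        rw [hz0] at hsum0
        have hsum : v.sum = (v.length : Int) := by simpa using hsum0
        rw [calcLoopA, if_neg (by simp [hsum])]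
        rw [scanB_skip]
        intro m hm
        rw [List.mem_range'_1] at hm
        have hmlt : m < v.length := by omega
        have hmem : v.getD m 0 ∈ v := by
          rw [List.getD_eq_getElem?_getD, List.getElem?_eq_getElem hmlt]
          simpa using List.getElem_mem hmlt
        have hall := List.countP_eq_zero.mp hz0
        have := hall _ hmem
        simpa using this
      · have hmem0 : (0 : Int) ∈ v := by
          by_contra h0
          exact hz0 (List.countP_eq_zero.mpr (fun a ha => by
            simp only [beq_iff_eq, decide_eq_true_eq]
            intro he; exact h0 (he ▸ ha)))
        obtain ⟨idx, hidx⟩ : ∃ idx, PySem.List.index? v 0 = some idx := by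
          have hs := (PySem.List.index?_isSome_iff v 0).mpr hmem0
          cases h : PySem.List.index? v 0 with
          | none => rw [h] at hs; simp at hs
          | some a => exact ⟨a, rfl⟩
        obtain ⟨hklt, hvk, hfirst⟩ := PySem.List.getElem_of_index?_eq_some hidx
        have hvidx : v.getD idx 0 = 0 := by
          simp [List.getD_eq_getElem?_getD, List.getElem?_eq_getElem hklt, hvk]
        have hsum : v.sum ≠ (v.length : Int) := by
          have h1 := pvSum_eq v hGV
          intro he
          rw [he] at h1
          have h2 : (pvZeros v : Int) = 0 := by omega
          exact hz0 (by exact_mod_cast h2)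
        have hA : calcLoopA g (f+1) v sol =
            calcLoopA g f (visitA g (v.length + 1) idx v) (sol + 1) := by
          rw [calcLoopA, if_pos (by simpa using hsum), hidx]
        have hidxg : idx < g.length := by omega
        have hkidx : k ≤ idx := by
          by_contra h
          push_neg at h
          exact hpre idx h hvidx
        have hsplit : List.range' k (g.length - k) =
            List.range' k (idx - k) ++ List.range' idx (g.length - idx) := by
          have hap := List.range'_append (s := k) (m := idx - k) (n := g.length - idx) (step := 1)
          have h1 : k + 1 * (idx - k) = idx := by omega
          have h2 : (idx - k) + (g.length - idx) = g.length - k := by omega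
          rw [h1, h2] at hap
          exact hap.symm
        rw [hA, hsplit, scanB_append]
        have hskip : scanB g (List.range' k (idx - k)) (sol, v) = (sol, v) := by
          apply scanB_skip
          intro m hm
          rw [List.mem_range'_1] at hm
          have hmidx : m < idx := by omega
          have hmlen : m < v.length := by omega
          simp [List.getD_eq_getElem?_getD, List.getElem?_eq_getElem hmlen]
          exact hfirst m hmidx
        rw [hskip]
        have hcons : List.range' idx (g.length - idx) =
            idx :: List.range' (idx + 1) (g.length - (idx + 1)) := by
          rw [show g.length - idx = (g.length - (idx + 1)) + 1 from by omega, List.range'_succ]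
        rw [hcons, scanB, if_pos hvidx, ← close_eq g hH1 v idx hlen hGV hidxg hvidx]
        have hzle : pvZeros v ≤ v.length := List.countP_le_length
        obtain ⟨hA1, hA2, hA3, hA4⟩ :=
          visitA_spec g hH1 (v.length + 1) v idx hlen hGV hidxg hvidx (by omega)
        have hpw : ∀ m, (visitA g (v.length + 1) idx v).getD m 0 = v.getD m 0 ∨
            (visitA g (v.length + 1) idx v).getD m 0 = 1 := by
          intro m
          rcases hA2 m with h | h
          · exact Or.inl h
          · exact Or.inr h.1
        have hzlt : pvZeros (visitA g (v.length + 1) idx v) < pvZeros v :=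
          pvZeros_lt _ v idx hA1 hpw (by rw [hA3]; norm_num) hvidx hklt
        have hGV' : pvGV (visitA g (v.length + 1) idx v) := by
          intro m
          rcases hpw m with h | h
          · rw [h]; exact hGV m
          · exact Or.inr h
        have hpre' : ∀ m, m < idx + 1 → (visitA g (v.length + 1) idx v).getD m 0 ≠ 0 := by
          intro m hm
          by_cases hmi : m = idx
          · rw [hmi, hA3]; norm_num
          · have hmlt : m < idx := by omega
            have hv0 : v.getD m 0 ≠ 0 := by
              have hmlen : m < v.length := by omega
              simp [List.getD_eq_getElem?_getD, List.getElem?_eq_getElem hmlen]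
              exact hfirst m hmlt
            rcases hpw m with h | h
            · rw [h]; exact hv0
            · rw [h]; norm_num
        have hrec := ihz (pvZeros (visitA g (v.length + 1) idx v)) (by omega)
          (visitA g (v.length + 1) idx v) (idx + 1) (sol + 1) f rfl (hA1.trans hlen) hGV'
          hpre' (by omega)
        exact hrec

theorem pvRepl_GV (n : Nat) : pvGV (List.replicate n (0 : Int)) := by
  intro k
  refine Or.inl ?_
  rw [List.getD_eq_getElem?_getD, List.getElem?_replicate]
  split <;> rfl

theorem cc_eq (g : List (List Int)) (hH1 : pvH1 g) (removed : List Int) :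
    calcObjective g removed = countComponents g removed := by
  have e1 : calcObjective g removed =
      calcLoopA g ((pvMarkRemoved (List.replicate g.length (0 : Int)) removed).length + 1)
        (pvMarkRemoved (List.replicate g.length (0 : Int)) removed) 0 := by
    unfold calcObjective
    rw [List.map_const']
  have e2 : countComponents g removed =
      (scanB g (List.range' 0 g.length)
        (0, pvMarkRemoved (List.replicate g.length (0 : Int)) removed)).1 := by
    unfold countComponents
    rw [List.range_eq_range']
  have hlen : (pvMarkRemoved (List.replicate g.length (0 : Int)) removed).length = g.length := by
    rw [pvMark_len]; exact List.length_replicate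
  have hGV := pvMark_GV removed _ (pvRepl_GV g.length)
  have hz : pvZeros (pvMarkRemoved (List.replicate g.length (0 : Int)) removed) ≤ g.length := by
    have : pvZeros (pvMarkRemoved (List.replicate g.length (0 : Int)) removed) ≤
        (pvMarkRemoved (List.replicate g.length (0 : Int)) removed).length :=
      List.countP_le_length
    omega
  have := seeds_eq g hH1 (pvZeros (pvMarkRemoved (List.replicate g.length (0 : Int)) removed))
    (pvMarkRemoved (List.replicate g.length (0 : Int)) removed) 0 0
    ((pvMarkRemoved (List.replicate g.length (0 : Int)) removed).length + 1) rfl hlen hGV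
    (fun m hm => absurd hm (Nat.not_lt_zero m)) (by omega)
  rw [Nat.sub_zero] at this
  rw [e1, e2, this]

theorem setFirstA_of_not_mem (a b : Int) : ∀ xs : List Int, a ∉ xs → setFirstA a b xs = xs := by
  intro xs
  induction xs with
  | nil => intro _; rw [setFirstA]
  | cons x rest ih =>
    intro h
    rw [setFirstA, if_neg (by intro he; exact h (he ▸ List.mem_cons_self ..)), ih (fun hm => h (List.mem_cons_of_mem _ hm))]

theorem setFirst_eq_index (a b : Int) : ∀ xs : List Int,
    (match PySem.List.index? xs a with
     | some p => xs.set p b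
     | none => xs) = setFirstA a b xs := by
  intro xs
  induction xs with
  | nil => simp [PySem.List.index?_eq_idxOf?, setFirstA]
  | cons x rest ih =>
    by_cases hx : x = a
    · subst hx
      rw [PySem.List.index?_cons_self, setFirstA, if_pos rfl]
      rfl
    · rw [PySem.List.index?_cons_of_ne rest hx, setFirstA, if_neg hx]
      cases h : PySem.List.index? rest a with
      | none =>
        have hnm : a ∉ rest := (PySem.List.index?_eq_none_iff rest a).mp h
        simp only [h, Option.map_none]
        rw [setFirstA_of_not_mem a b rest hnm]
      | some p =>
        simp only [h, Option.map_some]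
        rw [← ih, h]
        rfl

theorem applySwap_eq (removed : List Int) (r1 r2 l1 l2 : Int) :
    applySwapB removed r1 r2 l1 l2 = setFirstA r2 l2 (setFirstA r1 l1 removed) := by
  unfold applySwapB
  rw [setFirst_eq_index r1 l1 removed, setFirst_eq_index r2 l2]

theorem loopL2A_eq (g : List (List Int)) (sol : Int) (removed : List Int) (r1 r2 l1 : Int) :
    ∀ lst : List Int, loopL2A g sol removed r1 r2 l1 lst =
      if lst.any (fun l2 => decide (calcObjective g (setFirstA r2 l2 (setFirstA r1 l1 removed)) > sol))
      then some true else none := by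
  intro lst
  induction lst with
  | nil => rw [loopL2A]; simp
  | cons l2 rest ih =>
    rw [loopL2A]
    by_cases hc : calcObjective g (setFirstA r2 l2 (setFirstA r1 l1 removed)) > sol
    · rw [if_pos hc]
      simp [hc]
    · rw [if_neg hc, ih]
      simp [hc]

theorem loopL1A_eq (g : List (List Int)) (sol : Int) (removed left : List Int) (r1 r2 : Int) :
    ∀ lst : List Int, loopL1A g sol removed left r1 r2 lst =
      if lst.any (fun l1 => (left.filter (fun l => l != l1)).any (fun l2 =>
          decide (calcObjective g (setFirstA r2 l2 (setFirstA r1 l1 removed)) > sol)))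
      then some true else none := by
  intro lst
  induction lst with
  | nil => rw [loopL1A]; simp
  | cons l1 rest ih =>
    rw [loopL1A, loopL2A_eq]
    simp only [List.any_cons]
    by_cases hc : (left.filter (fun l => l != l1)).any (fun l2 =>
        decide (calcObjective g (setFirstA r2 l2 (setFirstA r1 l1 removed)) > sol)) = true
    · rw [if_pos hc]
      simp only [hc, Bool.true_or]
      rfl
    · have hc' : (left.filter (fun l => l != l1)).any (fun l2 =>
        decide (calcObjective g (setFirstA r2 l2 (setFirstA r1 l1 removed)) > sol)) = false := by
        revert hc; cases (left.filter (fun l => l != l1)).any (fun l2 =>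
        decide (calcObjective g (setFirstA r2 l2 (setFirstA r1 l1 removed)) > sol)) <;> simp
      rw [if_neg hc]
      simp only [hc', Bool.false_or]
      exact ih

theorem loopR2A_eq (g : List (List Int)) (sol : Int) (removed left : List Int) (r1 : Int) :
    ∀ lst : List Int, loopR2A g sol removed left r1 lst =
      if lst.any (fun r2 => left.any (fun l1 => (left.filter (fun l => l != l1)).any (fun l2 =>
          decide (calcObjective g (setFirstA r2 l2 (setFirstA r1 l1 removed)) > sol))))
      then some true else none := by
  intro lst
  induction lst with
  | nil => rw [loopR2A]; simp
  | cons r2 rest ih =>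
    rw [loopR2A, loopL1A_eq]
    simp only [List.any_cons]
    by_cases hc : left.any (fun l1 => (left.filter (fun l => l != l1)).any (fun l2 =>
        decide (calcObjective g (setFirstA r2 l2 (setFirstA r1 l1 removed)) > sol))) = true
    · rw [if_pos hc]
      simp only [hc, Bool.true_or]
      rfl
    · have hc' : left.any (fun l1 => (left.filter (fun l => l != l1)).any (fun l2 =>
        decide (calcObjective g (setFirstA r2 l2 (setFirstA r1 l1 removed)) > sol))) = false := by
        revert hc; cases left.any (fun l1 => (left.filter (fun l => l != l1)).any (fun l2 =>
        decide (calcObjective g (setFirstA r2 l2 (setFirstA r1 l1 removed)) > sol))) <;> simp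
      rw [if_neg hc]
      simp only [hc', Bool.false_or]
      exact ih

theorem loopR1A_eq (g : List (List Int)) (sol : Int) (removed left : List Int) :
    ∀ lst : List Int, loopR1A g sol removed left lst =
      if lst.any (fun r1 => (removed.filter (fun r => r != r1)).any (fun r2 =>
          left.any (fun l1 => (left.filter (fun l => l != l1)).any (fun l2 =>
            decide (calcObjective g (setFirstA r2 l2 (setFirstA r1 l1 removed)) > sol)))))
      then some true else none := by
  intro lst
  induction lst with
  | nil => rw [loopR1A]; simp
  | cons r1 rest ih =>
    rw [loopR1A, loopR2A_eq]
    simp only [List.any_cons]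
    by_cases hc : (removed.filter (fun r => r != r1)).any (fun r2 =>
        left.any (fun l1 => (left.filter (fun l => l != l1)).any (fun l2 =>
          decide (calcObjective g (setFirstA r2 l2 (setFirstA r1 l1 removed)) > sol)))) = true
    · rw [if_pos hc]
      simp only [hc, Bool.true_or]
      rfl
    · have hc' : (removed.filter (fun r => r != r1)).any (fun r2 =>
        left.any (fun l1 => (left.filter (fun l => l != l1)).any (fun l2 =>
          decide (calcObjective g (setFirstA r2 l2 (setFirstA r1 l1 removed)) > sol)))) = false := by
        revert hc; cases (removed.filter (fun r => r != r1)).any (fun r2 =>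
        left.any (fun l1 => (left.filter (fun l => l != l1)).any (fun l2 =>
          decide (calcObjective g (setFirstA r2 l2 (setFirstA r1 l1 removed)) > sol)))) <;> simp
      rw [if_neg hc]
      simp only [hc', Bool.false_or]
      exact ih

theorem alt_eq_any (graph : List (List Int)) (removed : List Int) :
    first_improvement_2_swap_alt graph removed =
      if removed.any (fun r1 => (removed.filter (fun r => r != r1)).any (fun r2 =>
          (pvLeft graph removed).any (fun l1 => ((pvLeft graph removed).filter (fun l => l != l1)).any (fun l2 =>
            decide (countComponents graph (applySwapB removed r1 r2 l1 l2) > countComponents graph removed)))))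
      then some true else none := by
  have e0 : first_improvement_2_swap_alt graph removed =
      (match List.find? (fun c : Int × Int × Int × Int =>
          decide (countComponents graph (applySwapB removed c.1 c.2.1 c.2.2.1 c.2.2.2) >
            countComponents graph removed))
        (removed.flatMap (fun r1 =>
          (removed.filter (fun r => r != r1)).flatMap (fun r2 =>
            (pvLeft graph removed).flatMap (fun l1 =>
              ((pvLeft graph removed).filter (fun l => l != l1)).map
                (fun l2 => (r1, r2, l1, l2)))))) with
       | some _ => some true
       | none => none) := rfl
  rw [e0]
  have hany : (removed.flatMap (fun r1 =>
        (removed.filter (fun r => r != r1)).flatMap (fun r2 =>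
          (pvLeft graph removed).flatMap (fun l1 =>
            ((pvLeft graph removed).filter (fun l => l != l1)).map
              (fun l2 => (r1, r2, l1, l2)))))).any (fun c : Int × Int × Int × Int =>
        decide (countComponents graph (applySwapB removed c.1 c.2.1 c.2.2.1 c.2.2.2) >
          countComponents graph removed)) =
      removed.any (fun r1 => (removed.filter (fun r => r != r1)).any (fun r2 =>
        (pvLeft graph removed).any (fun l1 =>
          ((pvLeft graph removed).filter (fun l => l != l1)).any (fun l2 =>
            decide (countComponents graph (applySwapB removed r1 r2 l1 l2) >
              countComponents graph removed))))) := by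
    simp only [List.any_flatMap, List.any_map, Function.comp_def]
  cases hf : List.find? (fun c : Int × Int × Int × Int =>
      decide (countComponents graph (applySwapB removed c.1 c.2.1 c.2.2.1 c.2.2.2) >
        countComponents graph removed))
      (removed.flatMap (fun r1 =>
        (removed.filter (fun r => r != r1)).flatMap (fun r2 =>
          (pvLeft graph removed).flatMap (fun l1 =>
            ((pvLeft graph removed).filter (fun l => l != l1)).map
              (fun l2 => (r1, r2, l1, l2)))))) with
  | some a =>
    have hT := List.any_eq_true.mpr ⟨a, List.mem_of_find?_eq_some hf, List.find?_some hf⟩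
    rw [hany] at hT
    rw [if_pos hT]
  | none =>
    have hF : ¬ (removed.any (fun r1 => (removed.filter (fun r => r != r1)).any (fun r2 =>
        (pvLeft graph removed).any (fun l1 =>
          ((pvLeft graph removed).filter (fun l => l != l1)).any (fun l2 =>
            decide (countComponents graph (applySwapB removed r1 r2 l1 l2) >
              countComponents graph removed))))) = true) := by
      rw [← hany, List.any_eq_true]
      rintro ⟨x, hx, hpx⟩
      exact absurd hpx (by simpa using List.find?_eq_none.mp hf x hx)
    rw [if_neg hF]

theorem pre_imp_H1 (graph : List (List Int)) (removed : List Int)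
    (hpre : Pre_first_improvement_2_swap graph removed) : pvH1 graph := by
  intro i j hval
  by_cases hi : i < graph.length
  · have hrow : graph.getD i [] = graph[i] := by
      rw [List.getD_eq_getElem?_getD, List.getElem?_eq_getElem hi]
      rfl
    by_cases hj : j < (graph.getD i []).length
    · by_contra hjn
      refine hpre.2 (graph.getD i []) ?_ j hj (by omega) hval
      rw [hrow]
      exact List.getElem_mem hi
    · rw [List.getD_eq_default _ _ (by omega)] at hval
      exact absurd hval (by norm_num)
  · have hnil : graph.getD i [] = ([] : List Int) := List.getD_eq_default _ _ (by omega)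
    rw [hnil] at hval
    simp at hval

-- ===== VERDICT (by name: the statement is the Claim_ definition above) =====
theorem first_improvement_2_swap_spec : Claim_equal_first_improvement_2_swap := by
  intro graph removed hdom hpre
  have hH1 := pre_imp_H1 graph removed hpre
  have hcc : ∀ r : List Int, calcObjective graph r = countComponents graph r :=
    fun r => cc_eq graph hH1 r
  unfold Spec_first_improvement_2_swap
  have eA : first_improvement_2_swap graph removed =
      if removed.any (fun r1 => (removed.filter (fun r => r != r1)).any (fun r2 =>
        (pvLeft graph removed).any (fun l1 =>
          ((pvLeft graph removed).filter (fun l => l != l1)).any (fun l2 =>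
            decide (calcObjective graph (setFirstA r2 l2 (setFirstA r1 l1 removed)) >
              calcObjective graph removed)))))
      then some true else none := by
    unfold first_improvement_2_swap
    exact loopR1A_eq graph (calcObjective graph removed) removed (pvLeft graph removed) removed
  rw [eA, alt_eq_any]
  simp only [hcc, applySwap_eq]
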